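-- pv_equiv track=rewrite | github.com/dece/Bebop | bebop/metalines.py | _find_next_sep
-- ===== SOURCE A (Python) =====
-- SPLIT_CHARS = " \t-"
--
-- def _find_next_sep(text: str):
--     """Find the next separator index and return both the separator and index."""
--     indices = []
--     for sep in SPLIT_CHARS:
--         try:
--             indices.append((sep, text.index(sep)))
--         except ValueError:
--             pass
--     if not indices:
--         return ("", 0)
--     return min(indices, key=lambda e: e[1])
-- ===== SOURCE B (Python) =====
-- def _find_next_sep(text: str):
--     """Find the next separator index and return both the separator and index."""
--     for i, char in enumerate(text):
--         if char in (" ", "\t", "-"):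
--             return (char, i)
--     return ("", 0)
-- ===== Notes on version B (the rewrite author's own statement) =====
-- stated objective: simpler
-- what changed: Replaced the three independent text.index scans plus min(..., key=...) over the collected (sep, index) pairs with a single forward pass over enumerate(text) that returns the first separator character it meets.
import Mathlib
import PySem

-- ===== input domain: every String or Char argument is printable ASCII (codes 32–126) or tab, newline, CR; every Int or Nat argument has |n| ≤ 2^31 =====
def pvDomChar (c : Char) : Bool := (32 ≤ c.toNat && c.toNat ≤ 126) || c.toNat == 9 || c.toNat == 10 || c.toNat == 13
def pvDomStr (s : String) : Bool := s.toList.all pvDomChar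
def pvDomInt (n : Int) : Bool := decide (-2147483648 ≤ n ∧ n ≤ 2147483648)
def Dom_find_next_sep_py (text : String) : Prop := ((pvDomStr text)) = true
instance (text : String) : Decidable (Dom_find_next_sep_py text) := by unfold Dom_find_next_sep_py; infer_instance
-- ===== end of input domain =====

-- B replaces A's three independent index scans + min(..., key) with one forward pass returning the first separator; same result, simpler.


-- ===== PORT A =====
-- SPLIT_CHARS = " \t-"
def pvSplitChars : List Char := [' ', '\t', '-']

-- the body of A on text.toList: collect (sep, text.index(sep)) for each sep that occurs, then min by index
def pvListA (l : List Char) : String × Int :=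
  let indices := pvSplitChars.foldl (fun acc sep =>
      match PySem.List.index? l sep with
      | some i => acc ++ [(String.mk [sep], (i : Int))]
      | none => acc) []
  match PySem.List.min? indices (fun e => e.2) with
  | none => ("", 0)          -- `if not indices: return ("", 0)`
  | some m => m

def find_next_sep_py (text : String) : String × Int := pvListA text.toList

-- ===== PORT B =====
-- the for-loop over enumerate(text): i is the running index
def pvScanB : List Char → Int → String × Int
  | [], _ => ("", 0)
  | c :: rest, i => if c ∈ pvSplitChars then (String.mk [c], i) else pvScanB rest (i + 1)

def find_next_sep_py_alt (text : String) : String × Int := pvScanB text.toList 0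

-- ===== PRECONDITION & SPEC =====
def Spec_find_next_sep_py (text : String) (out : String × Int) : Prop := out = find_next_sep_py_alt text
instance (text : String) (out : String × Int) : Decidable (Spec_find_next_sep_py text out) := by unfold Spec_find_next_sep_py; infer_instance

-- ===== CLAIM (what is proved, stated in full; the proofs are below) =====
def Claim_equal_find_next_sep_py : Prop := ∀ (text : String), Dom_find_next_sep_py text → Spec_find_next_sep_py text (find_next_sep_py text)

-- ===== LEMMAS AND PROOFS =====

lemma pvListA_cons_space (t : List Char) : pvListA (' ' :: t) = (" ", 0) := by
  simp only [pvListA, pvSplitChars, List.foldl, PySem.List.index?_cons_self,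
    PySem.List.index?_cons_of_ne t (by decide : (' ' : Char) ≠ '\t'),
    PySem.List.index?_cons_of_ne t (by decide : (' ' : Char) ≠ '-')]
  rcases PySem.List.index? t '\t' with _ | a <;>
  rcases PySem.List.index? t '-' with _ | b <;>
    simp [PySem.List.min?, Option.map] <;> repeat' (first | decide | omega | (split_ifs <;> try simp))

lemma pvListA_cons_tab (t : List Char) : pvListA ('\t' :: t) = ("\t", 0) := by
  simp only [pvListA, pvSplitChars, List.foldl, PySem.List.index?_cons_self,
    PySem.List.index?_cons_of_ne t (by decide : ('\t' : Char) ≠ ' '),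
    PySem.List.index?_cons_of_ne t (by decide : ('\t' : Char) ≠ '-')]
  rcases PySem.List.index? t ' ' with _ | a <;>
  rcases PySem.List.index? t '-' with _ | b <;>
    simp [PySem.List.min?, Option.map] <;> repeat' (first | decide | omega | (split_ifs <;> try simp))

lemma pvListA_cons_dash (t : List Char) : pvListA ('-' :: t) = ("-", 0) := by
  simp only [pvListA, pvSplitChars, List.foldl, PySem.List.index?_cons_self,
    PySem.List.index?_cons_of_ne t (by decide : ('-' : Char) ≠ ' '),
    PySem.List.index?_cons_of_ne t (by decide : ('-' : Char) ≠ '\t')]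
  rcases PySem.List.index? t ' ' with _ | a <;>
  rcases PySem.List.index? t '\t' with _ | b <;>
    simp [PySem.List.min?, Option.map] <;> repeat' (first | decide | omega | (split_ifs <;> try simp))

lemma pvListA_cons_sep (c : Char) (t : List Char) (h : c ∈ pvSplitChars) :
    pvListA (c :: t) = (String.mk [c], 0) := by
  fin_cases h
  · exact pvListA_cons_space t
  · exact pvListA_cons_tab t
  · exact pvListA_cons_dash t

lemma pvListA_cons_nonsep (c : Char) (t : List Char) (h : c ∉ pvSplitChars) :
    pvListA (c :: t) =
      (if (pvListA t).1 = "" then (("", 0) : String × Int)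
       else ((pvListA t).1, (pvListA t).2 + 1)) := by
  simp only [pvSplitChars, List.mem_cons, List.not_mem_nil, or_false, not_or] at h
  obtain ⟨h1, h2, h3⟩ := h
  simp only [pvListA, pvSplitChars, List.foldl,
    PySem.List.index?_cons_of_ne t h1,
    PySem.List.index?_cons_of_ne t h2,
    PySem.List.index?_cons_of_ne t h3]
  rcases PySem.List.index? t ' ' with _ | a <;>
  rcases PySem.List.index? t '\t' with _ | b <;>
  rcases PySem.List.index? t '-' with _ | d <;>
    simp [PySem.List.min?, Option.map] <;>
      repeat' (first | decide | omega | rfl |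
        (rw [Prod.mk.injEq]; exact ⟨by decide, by omega⟩) |
        (intro hs; exact absurd hs (by decide)) | simp_all | (exact absurd ‹String.mk [' '] = ""› (by decide)) | (exact absurd ‹String.mk ['\t'] = ""› (by decide)) | (exact absurd ‹String.mk ['-'] = ""› (by decide)) | (split_ifs <;> try simp))

lemma pvMain (l : List Char) :
    (pvListA l = ("", 0) ∧ ∀ i, pvScanB l i = ("", 0)) ∨
    ((pvListA l).1 ≠ "" ∧ ∀ i, pvScanB l i = ((pvListA l).1, (pvListA l).2 + i)) := by
  induction l with
  | nil =>
    left
    constructor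
    · decide
    · intro i; rfl
  | cons c t ih =>
    by_cases hc : c ∈ pvSplitChars
    · right
      rw [pvListA_cons_sep c t hc]
      refine ⟨by fin_cases hc <;> decide, ?_⟩
      intro i
      simp [pvScanB, hc]
    · rw [pvListA_cons_nonsep c t hc]
      rcases ih with ⟨h1, h2⟩ | ⟨h1, h2⟩
      · left
        rw [h1]
        refine ⟨by simp, ?_⟩
        intro i
        simp [pvScanB, hc, h2]
      · right
        rw [if_neg h1]
        refine ⟨h1, ?_⟩
        intro i
        simp only [pvScanB, if_neg hc, h2 (i + 1)]
        rw [Prod.mk.injEq]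
        exact ⟨rfl, by ring⟩

-- ===== VERDICT (by name: the statement is the Claim_ definition above) =====
theorem find_next_sep_py_spec : Claim_equal_find_next_sep_py := by
  intro text _
  unfold Spec_find_next_sep_py find_next_sep_py find_next_sep_py_alt
  rcases pvMain text.toList with ⟨h1, h2⟩ | ⟨h1, h2⟩
  · rw [h1, h2]
  · rw [h2 0]
    ext
    · rfl
    · simp
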